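-- pv_equiv track=rewrite | github.com/josongsong/semantica-codegraph | packages/codegraph-search/codegraph_search/infrastructure/evaluation/metrics_legacy.py | first_relevant_rank
-- ===== SOURCE A (Python) =====
-- from collections.abc import Sequence
--
-- def first_relevant_rank(
--     retrieved_ids: Sequence[str],
--     relevant_ids: set[str],
-- ) -> int | None:
--     """
--     Find the rank (1-indexed) of the first relevant result.
--
--     Args:
--         retrieved_ids: Ordered list of retrieved chunk IDs
--         relevant_ids: Set of ground truth relevant chunk IDs
--
--     Returns:
--         Rank of first relevant result (1-indexed), or None if not found
--
--     Example:
--         >>> first_relevant_rank(["c1", "c2", "c3"], {"c2"})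
--         2
--         >>> first_relevant_rank(["c1", "c2", "c3"], {"c4"})
--         None
--     """
--     for rank, chunk_id in enumerate(retrieved_ids, start=1):
--         if chunk_id in relevant_ids:
--             return rank
--     return None
-- ===== SOURCE B (Python) =====
-- def first_relevant_rank(retrieved_ids, relevant_ids):
--     # Index each retrieved id by its first 1-indexed position, then take the
--     # minimum position over the relevant ids that were retrieved.
--     pos = {}
--     for rank, chunk_id in enumerate(retrieved_ids, start=1):
--         if chunk_id not in pos:
--             pos[chunk_id] = rank
--     ranks = [pos[r] for r in relevant_ids if r in pos]
--     return min(ranks) if ranks else None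
-- ===== Notes on version B (the rewrite author's own statement) =====
-- stated objective: alternative
-- what changed: Instead of scanning retrieved_ids and testing membership in the relevant set, B builds a dict from each retrieved id to its first 1-indexed position in one pass, looks up each relevant id in it, and returns the minimum found position (None if none found).
import Mathlib
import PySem

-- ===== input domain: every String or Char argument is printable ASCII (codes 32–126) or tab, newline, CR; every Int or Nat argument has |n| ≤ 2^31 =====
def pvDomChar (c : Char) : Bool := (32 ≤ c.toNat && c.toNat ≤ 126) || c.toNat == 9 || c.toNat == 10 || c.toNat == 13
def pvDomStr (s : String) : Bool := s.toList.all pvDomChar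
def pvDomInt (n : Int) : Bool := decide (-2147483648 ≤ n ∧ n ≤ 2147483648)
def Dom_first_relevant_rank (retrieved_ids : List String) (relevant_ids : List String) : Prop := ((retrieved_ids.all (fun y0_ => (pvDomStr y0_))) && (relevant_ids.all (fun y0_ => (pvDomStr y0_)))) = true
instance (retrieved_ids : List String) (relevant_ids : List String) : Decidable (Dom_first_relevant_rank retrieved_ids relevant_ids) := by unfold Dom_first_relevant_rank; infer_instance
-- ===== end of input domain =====

-- B indexes each retrieved id by its first 1-indexed position and takes the minimum
-- position over the relevant ids found in that index (alternative decomposition, same cost).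

-- ===== PORT A =====
-- the 'for rank, chunk_id in enumerate(retrieved_ids, start=1)' loop with early return
def firstRelGo (relevant_ids : List String) : List String → Int → Option Int
  | [], _ => none
  | chunk_id :: rest, rank =>
      if relevant_ids.contains chunk_id then some rank
      else firstRelGo relevant_ids rest (rank + 1)

def first_relevant_rank (retrieved_ids : List String) (relevant_ids : List String) : Option Int :=
  firstRelGo relevant_ids retrieved_ids 1

-- ===== PORT B =====
-- one step of B's first loop: insert chunk_id at the current rank only if absent, bump the rank
def bStep (st : PySem.Dict String Int × Int) (chunk_id : String) : PySem.Dict String Int × Int :=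
  (if st.1.contains chunk_id then st.1 else st.1.insert chunk_id st.2, st.2 + 1)

def first_relevant_rank_alt (retrieved_ids : List String) (relevant_ids : List String) : Option Int :=
  let pos := (retrieved_ids.foldl bStep (PySem.Dict.empty, 1)).1
  let ranks := relevant_ids.filterMap (fun r => pos.get? r)
  if ranks.isEmpty then none else PySem.List.min? ranks (fun x => x)

-- ===== PRECONDITION & SPEC =====
def Spec_first_relevant_rank (retrieved_ids : List String) (relevant_ids : List String) (out : Option Int) : Prop := out = first_relevant_rank_alt retrieved_ids relevant_ids
instance (retrieved_ids : List String) (relevant_ids : List String) (out : Option Int) : Decidable (Spec_first_relevant_rank retrieved_ids relevant_ids out) := by unfold Spec_first_relevant_rank; infer_instance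

-- ===== CLAIM (what is proved, stated in full; the proofs are below) =====
def Claim_equal_first_relevant_rank : Prop := ∀ (retrieved_ids : List String) (relevant_ids : List String), Dom_first_relevant_rank retrieved_ids relevant_ids → Spec_first_relevant_rank retrieved_ids relevant_ids (first_relevant_rank retrieved_ids relevant_ids)

-- ===== LEMMAS AND PROOFS =====

-- a key that is not in the dict has no value
lemma get?_eq_none_of_not_contains (d : PySem.Dict String Int) (x : String)
    (hc : ¬ d.contains x = true) : d.get? x = none := by
  cases hg : d.get? x with
  | none => rfl
  | some v => exact absurd (by rw [PySem.Dict.contains_eq_isSome_get?, hg]; rfl) hc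

-- A's loop returns k plus the first index whose id is relevant
lemma firstRelGo_char (rel : List String) (xs : List String) (k : Int) :
    firstRelGo rel xs k
      = (xs.findIdx? (fun x => rel.contains x)).map (fun (i : Nat) => k + (i : Int)) := by
  induction xs generalizing k with
  | nil => simp [firstRelGo]
  | cons x xs ih =>
      simp only [firstRelGo, List.findIdx?_cons]
      by_cases h : rel.contains x
      · simp [List.contains_iff_mem.mp h]
      · rw [if_neg h, if_neg h, ih (k + 1), Option.map_map]
        congr 1
        funext i
        simp
        ring

-- B's first loop: the dict maps r to its (offset) first index in xs, unless r is already a key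
lemma build_get? (xs : List String) (d : PySem.Dict String Int) (k : Int) (r : String) :
    ((xs.foldl bStep (d, k)).1).get? r
      = (d.get? r).or ((PySem.List.index? xs r).map (fun (i : Nat) => k + (i : Int))) := by
  induction xs generalizing d k with
  | nil =>
      simp [PySem.List.index?_eq_idxOf?, List.idxOf?]
  | cons x xs ih =>
      simp only [List.foldl_cons]
      by_cases hxr : x = r
      · subst hxr
        rw [PySem.List.index?_cons_self x xs]
        by_cases hc : d.contains x
        · have hs : (d.get? x).isSome := by
            rw [← PySem.Dict.contains_eq_isSome_get?]; exact hc
          obtain ⟨v, hv⟩ := Option.isSome_iff_exists.mp hs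
          simp only [bStep, hc, if_pos, ih, hv, Option.some_or]
        · have hn : d.get? x = none := get?_eq_none_of_not_contains d x hc
          simp only [bStep, hc, Bool.false_eq_true, ite_false, ih,
            PySem.Dict.get?_insert_self, Option.some_or, hn, Option.none_or]
          simp
      · rw [PySem.List.index?_cons_of_ne xs hxr]
        calc ((xs.foldl bStep (bStep (d, k) x)).1).get? r
            = ((bStep (d, k) x).1.get? r).or
                ((PySem.List.index? xs r).map (fun (i : Nat) => (k + 1) + (i : Int))) := by
              rw [show (bStep (d, k) x) = ((bStep (d, k) x).1, k + 1) from rfl, ih]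
          _ = (d.get? r).or (((PySem.List.index? xs r).map (fun (i : Nat) => i + 1)).map
                (fun (i : Nat) => k + (i : Int))) := by
              have hget : (bStep (d, k) x).1.get? r = d.get? r := by
                by_cases hc : d.contains x
                · simp [bStep, hc]
                · simp [bStep, hc, PySem.Dict.get?_insert_of_ne d k (Ne.symm hxr)]
              rw [hget, Option.map_map]
              congr 2
              funext i
              simp
              ring

-- the value B looks up for r: 1 + first index of r in retrieved_ids, when present
lemma pos_get? (xs : List String) (r : String) :
    ((xs.foldl bStep (PySem.Dict.empty, 1)).1).get? r
      = (PySem.List.index? xs r).map (fun (i : Nat) => 1 + (i : Int)) := by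
  rw [build_get?, PySem.Dict.get?_empty, Option.none_or]

-- ===== VERDICT (by name: the statement is the Claim_ definition above) =====
theorem first_relevant_rank_spec : Claim_equal_first_relevant_rank := by
  intro xs rel _
  unfold Spec_first_relevant_rank first_relevant_rank first_relevant_rank_alt
  simp only [pos_get?]
  rw [firstRelGo_char]
  set ranks := rel.filterMap (fun r => (PySem.List.index? xs r).map (fun (i : Nat) => 1 + (i : Int)))
    with hranks
  cases hfi : xs.findIdx? (fun x => rel.contains x) with
  | none =>
      have hall := List.findIdx?_eq_none_iff.mp hfi
      have hnil : ranks = [] := by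
        rw [hranks, List.filterMap_eq_nil_iff]
        intro r hr
        have hnotin : r ∉ xs := by
          intro hmem
          have h1 := hall r hmem
          have h2 : rel.contains r = true := List.contains_iff_mem.mpr hr
          rw [h1] at h2
          exact Bool.false_ne_true h2
        rw [(PySem.List.index?_eq_none_iff xs r).mpr hnotin]
        rfl
      simp [hnil]
  | some i =>
      obtain ⟨hi, hpi, hmin⟩ := List.findIdx?_eq_some_iff_getElem.mp hfi
      have hr0mem : xs[i] ∈ rel := List.contains_iff_mem.mp hpi
      -- first index of xs[i] in xs is i itself
      have hidx : PySem.List.index? xs xs[i] = some i := by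
        obtain ⟨j, hj⟩ := Option.isSome_iff_exists.mp
          ((PySem.List.index?_isSome_iff xs xs[i]).mpr (xs.getElem_mem hi))
        obtain ⟨hjlt, hgj, hminj⟩ := PySem.List.getElem_of_index?_eq_some hj
        have hij : i ≤ j := by
          by_contra hlt
          exact hmin j (by omega) (by rw [hgj]; exact List.contains_iff_mem.mpr hr0mem)
        have hji : j ≤ i := by
          by_contra hlt
          exact hminj i (by omega) rfl
        rwa [show j = i by omega] at hj
      have hm : (1 + (i : Int)) ∈ ranks := by
        rw [hranks, List.mem_filterMap]
        exact ⟨xs[i], hr0mem, by rw [hidx]; rfl⟩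
      have hlb : ∀ v ∈ ranks, (1 + (i : Int)) ≤ v := by
        intro v hv
        rw [hranks, List.mem_filterMap] at hv
        obtain ⟨r, hr, heq⟩ := hv
        obtain ⟨j, hj, hveq⟩ := Option.map_eq_some_iff.mp heq
        obtain ⟨hjlt, hgj, _⟩ := PySem.List.getElem_of_index?_eq_some hj
        have hij : i ≤ j := by
          by_contra hlt
          exact hmin j (by omega) (by rw [hgj]; exact List.contains_iff_mem.mpr hr)
        omega
      have hne : ranks ≠ [] := fun h => by simp [h] at hm
      obtain ⟨v₀, hv₀⟩ := Option.isSome_iff_exists.mp (by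
        rw [Option.isSome_iff_ne_none]
        intro h
        exact hne ((PySem.List.min?_eq_none_iff ranks (fun x => x)).mp h))
      have hv₀mem := PySem.List.min?_mem hv₀
      have hv₀min := PySem.List.min?_isMin hv₀
      have hv0 : v₀ = 1 + (i : Int) :=
        le_antisymm (hv₀min _ hm) (hlb _ hv₀mem)
      simp [hne, hv₀, hv0]
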